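-- pv_equiv track=rewrite | github.com/uclnlp/jack | jack/io/CBT2jtr.py | __split_cbt
-- ===== SOURCE A (Python) =====
-- def __split_cbt(raw_data, first_n=None):
--     """ splits raw cbt data into parts corresponding to each instance """
--     story_instances = []
--     instance = []
--     for l in raw_data.split('\n')[:-1]:
--         if l == '':  # reset instance every time an empty line is encountered
--             story_instances.append(instance)
--             instance = []
--             continue
--         instance.append(l)
--     if first_n:
--         return story_instances[:first_n]
--     return story_instances
-- ===== SOURCE B (Python) =====
-- def __split_cbt(raw_data, first_n=None):
--     """ splits raw cbt data into parts corresponding to each instance """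
--     lines = raw_data.split('\n')[:-1]
--     story_instances = []
--     while '' in lines:
--         k = lines.index('')
--         story_instances.append(lines[:k])
--         lines = lines[k + 1:]
--     if first_n:
--         return story_instances[:first_n]
--     return story_instances
-- ===== Notes on version B (the rewrite author's own statement) =====
-- stated objective: alternative
-- what changed: Replaces A's single-pass accumulator loop (append each line, flush on blank) with a loop that repeatedly finds the first blank line with list.index and slices the group off the front of the line list.
import Mathlib
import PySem

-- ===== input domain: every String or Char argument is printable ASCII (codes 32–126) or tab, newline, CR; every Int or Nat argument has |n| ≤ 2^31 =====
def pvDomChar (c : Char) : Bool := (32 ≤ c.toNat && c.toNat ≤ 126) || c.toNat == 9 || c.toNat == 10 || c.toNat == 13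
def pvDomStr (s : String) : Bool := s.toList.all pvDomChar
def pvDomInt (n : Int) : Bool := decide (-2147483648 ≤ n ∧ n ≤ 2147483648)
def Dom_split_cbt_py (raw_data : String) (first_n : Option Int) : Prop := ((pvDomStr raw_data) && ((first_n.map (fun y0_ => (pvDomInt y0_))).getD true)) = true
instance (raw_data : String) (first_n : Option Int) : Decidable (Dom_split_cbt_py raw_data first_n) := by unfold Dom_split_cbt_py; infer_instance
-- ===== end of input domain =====

-- B replaces A's element-by-element accumulator loop with a loop that repeatedly finds the first blank line and slices a group off (alternative decomposition, same cost).


-- ===== PORT A =====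
-- A: fold over raw_data.split('\n')[:-1] with state (story_instances, instance); a blank line flushes instance.
-- raw_data.split('\n') is PySem.Str.split? with sep "\n" ≠ "", so it is always `some`; `.getD []` only discharges the Option.
def split_cbt_py (raw_data : String) (first_n : Option Int) : List (List String) :=
  let lines := PySem.List.slice ((PySem.Str.split? raw_data "\n").getD []) none (some (-1))
  let st := lines.foldl
    (fun (st : List (List String) × List String) l =>
      if l = "" then (st.1 ++ [st.2], []) else (st.1, st.2 ++ [l]))
    ([], [])
  let story_instances := st.1
  -- `if first_n:` — truthy iff first_n is a nonzero int
  match first_n with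
  | some n => if n ≠ 0 then PySem.List.slice story_instances none (some n) else story_instances
  | none => story_instances

-- ===== PORT B =====
-- B's while loop: `'' in lines` and `lines.index('')` ported together as one match on index?
-- (index? is some exactly when '' is in lines), then `lines[:k]` is appended and `lines = lines[k+1:]`.
def splitCbtAltLoop (lines : List String) (acc : List (List String)) : List (List String) :=
  match h : PySem.List.index? lines "" with
  | none => acc
  | some k => splitCbtAltLoop (lines.drop (k + 1)) (acc ++ [lines.take k])
termination_by lines.length
decreasing_by
  have hm : "" ∈ lines := (PySem.List.index?_isSome_iff lines "").1 (by rw [h]; rfl)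
  have := List.length_pos_of_mem hm
  simp only [List.length_drop]
  omega

def split_cbt_py_alt (raw_data : String) (first_n : Option Int) : List (List String) :=
  let lines := PySem.List.slice ((PySem.Str.split? raw_data "\n").getD []) none (some (-1))
  let story_instances := splitCbtAltLoop lines []
  match first_n with
  | some n => if n ≠ 0 then PySem.List.slice story_instances none (some n) else story_instances
  | none => story_instances

-- ===== PRECONDITION & SPEC =====
def Spec_split_cbt_py (raw_data : String) (first_n : Option Int) (out : List (List String)) : Prop := out = split_cbt_py_alt raw_data first_n
instance (raw_data : String) (first_n : Option Int) (out : List (List String)) : Decidable (Spec_split_cbt_py raw_data first_n out) := by unfold Spec_split_cbt_py; infer_instance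

-- ===== CLAIM (what is proved, stated in full; the proofs are below) =====
def Claim_equal_split_cbt_py : Prop := ∀ (raw_data : String) (first_n : Option Int), Dom_split_cbt_py raw_data first_n → Spec_split_cbt_py raw_data first_n (split_cbt_py raw_data first_n)

-- ===== LEMMAS AND PROOFS =====

-- unfolding equations of the well-founded loop
theorem splitCbtAltLoop_none (lines : List String) (acc : List (List String))
    (h : PySem.List.index? lines "" = none) : splitCbtAltLoop lines acc = acc := by
  rw [splitCbtAltLoop.eq_def]
  rw [PySem.List.index?_eq_idxOf?] at h
  split
  · rfl
  · next k heq => simp [h] at heq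

theorem splitCbtAltLoop_some (lines : List String) (acc : List (List String)) (k : Nat)
    (h : PySem.List.index? lines "" = some k) :
    splitCbtAltLoop lines acc = splitCbtAltLoop (lines.drop (k + 1)) (acc ++ [lines.take k]) := by
  rw [splitCbtAltLoop.eq_def]
  rw [PySem.List.index?_eq_idxOf?] at h
  split
  · next heq => simp [h] at heq
  · next k2 heq => simp [h] at heq; subst heq; rfl

-- the accumulator only prepends
theorem splitCbtAltLoop_acc_aux (n : Nat) :
    ∀ (lines : List String), lines.length ≤ n →
      ∀ acc, splitCbtAltLoop lines acc = acc ++ splitCbtAltLoop lines [] := by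
  induction n with
  | zero =>
    intro lines hlen acc
    have : lines = [] := List.eq_nil_of_length_eq_zero (Nat.le_zero.1 hlen)
    subst this
    rw [splitCbtAltLoop_none _ _ ((PySem.List.index?_eq_none_iff [] "").2 (by simp)),
        splitCbtAltLoop_none _ _ ((PySem.List.index?_eq_none_iff [] "").2 (by simp))]
    simp
  | succ n ih =>
    intro lines hlen acc
    rcases h : PySem.List.index? lines "" with _ | k
    · rw [splitCbtAltLoop_none _ _ h, splitCbtAltLoop_none _ _ h]; simp
    · have hm : "" ∈ lines := (PySem.List.index?_isSome_iff lines "").1 (by rw [h]; rfl)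
      have hpos := List.length_pos_of_mem hm
      have hd : (lines.drop (k + 1)).length ≤ n := by
        simp only [List.length_drop]; omega
      rw [splitCbtAltLoop_some _ _ _ h, splitCbtAltLoop_some _ _ _ h,
          ih _ hd, ih _ hd]
      conv_rhs => rw [ih _ hd]
      simp

theorem splitCbtAltLoop_acc (lines : List String) :
    ∀ acc, splitCbtAltLoop lines acc = acc ++ splitCbtAltLoop lines [] :=
  splitCbtAltLoop_acc_aux lines.length lines le_rfl

-- structural behaviour of B's loop on the head of the line list
theorem splitCbtAltLoop_nil : splitCbtAltLoop [] [] = [] :=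
  splitCbtAltLoop_none [] [] ((PySem.List.index?_eq_none_iff [] "").2 (by simp))

theorem splitCbtAltLoop_blank_cons (t : List String) :
    splitCbtAltLoop ("" :: t) [] = [] :: splitCbtAltLoop t [] := by
  rw [splitCbtAltLoop_some ("" :: t) [] 0 (PySem.List.index?_cons_self "" t)]
  simp only [List.drop_succ_cons, List.drop_zero, List.take_zero, List.nil_append]
  rw [splitCbtAltLoop_acc]
  rfl

-- prepend to the head group (how A's running `instance` relates to B's groups)
def pvMapHead (cur : List String) : List (List String) → List (List String)
  | [] => []
  | g :: gs => (cur ++ g) :: gs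

theorem splitCbtAltLoop_cons (l : String) (t : List String) (hl : l ≠ "") :
    splitCbtAltLoop (l :: t) [] = pvMapHead [l] (splitCbtAltLoop t []) := by
  have hidx : PySem.List.index? (l :: t) "" = (PySem.List.index? t "").map (· + 1) :=
    PySem.List.index?_cons_of_ne t hl
  rcases hk : PySem.List.index? t "" with _ | k
  · rw [splitCbtAltLoop_none _ _ (by rw [hidx, hk]; rfl),
        splitCbtAltLoop_none _ _ hk]
    rfl
  · rw [splitCbtAltLoop_some (l :: t) [] (k + 1) (by rw [hidx, hk]; rfl),
        splitCbtAltLoop_some t [] k hk]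
    simp only [List.drop_succ_cons, List.take_succ_cons, List.nil_append]
    rw [splitCbtAltLoop_acc]
    conv_rhs => rw [splitCbtAltLoop_acc (t.drop (k + 1)) [t.take k]]
    simp [pvMapHead]

-- A's fold equals B's loop, generalized over A's running state
theorem foldA_eq (lines : List String) (acc : List (List String)) (cur : List String) :
    (lines.foldl
      (fun (st : List (List String) × List String) l =>
        if l = "" then (st.1 ++ [st.2], []) else (st.1, st.2 ++ [l]))
      (acc, cur)).1 = acc ++ pvMapHead cur (splitCbtAltLoop lines []) := by
  induction lines generalizing acc cur with
  | nil => simp [splitCbtAltLoop_nil, pvMapHead]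
  | cons l t ih =>
    by_cases hl : l = ""
    · subst hl
      simp only [List.foldl_cons, if_true]
      rw [ih, splitCbtAltLoop_blank_cons]
      cases hg : splitCbtAltLoop t [] <;> simp [pvMapHead]
    · simp only [List.foldl_cons, if_neg hl]
      rw [ih, splitCbtAltLoop_cons l t hl]
      cases hg : splitCbtAltLoop t [] <;> simp [pvMapHead]

-- ===== VERDICT (by name: the statement is the Claim_ definition above) =====
theorem split_cbt_py_spec : Claim_equal_split_cbt_py := by
  intro raw_data first_n _
  unfold Spec_split_cbt_py split_cbt_py split_cbt_py_alt
  have hstory :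
      ((PySem.List.slice ((PySem.Str.split? raw_data "\n").getD []) none (some (-1))).foldl
        (fun (st : List (List String) × List String) l =>
          if l = "" then (st.1 ++ [st.2], []) else (st.1, st.2 ++ [l]))
        ([], [])).1
      = splitCbtAltLoop (PySem.List.slice ((PySem.Str.split? raw_data "\n").getD []) none (some (-1))) [] := by
    rw [foldA_eq]
    cases hg : splitCbtAltLoop (PySem.List.slice ((PySem.Str.split? raw_data "\n").getD []) none (some (-1))) [] <;>
      simp [pvMapHead]
  simp only [hstory]
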